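-- pv_equiv track=rewrite | github.com/Fypur/Navigation | clubTech/src/graph/graph/logic/utils.py | merge_kaplas
-- ===== SOURCE A (Python) =====
-- def merge_kaplas(kapla1, kapla2):
--     min_x = kapla1[0][0]
--     max_x = kapla1[0][0]
--     min_y = kapla1[0][1]
--     max_y = kapla1[0][1]
--     for point in kapla1+kapla2:
--         if point[0] > max_x:
--             max_x = point[0]
--         if point[0] < min_x:
--             min_x = point[0]
--         if point[1] > max_y:
--             max_y = point[1]
--         if point[1] < min_y:
--             min_y = point[1]
--     return [(min_x, max_y), (max_x, max_y), (max_x, min_y), (min_x, min_y)]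
-- ===== SOURCE B (Python) =====
-- def merge_kaplas(kapla1, kapla2):
--     xs = sorted(p[0] for p in kapla1 + kapla2)
--     ys = sorted(p[1] for p in kapla1 + kapla2)
--     return [(xs[0], ys[-1]), (xs[-1], ys[-1]), (xs[-1], ys[0]), (xs[0], ys[0])]
-- ===== Notes on version B (the rewrite author's own statement) =====
-- stated objective: alternative
-- what changed: Replaces A's single scan tracking four running extrema by sorting the x and y coordinate lists once and reading the bounds off as the first and last elements of each sorted list.
import Mathlib
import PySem

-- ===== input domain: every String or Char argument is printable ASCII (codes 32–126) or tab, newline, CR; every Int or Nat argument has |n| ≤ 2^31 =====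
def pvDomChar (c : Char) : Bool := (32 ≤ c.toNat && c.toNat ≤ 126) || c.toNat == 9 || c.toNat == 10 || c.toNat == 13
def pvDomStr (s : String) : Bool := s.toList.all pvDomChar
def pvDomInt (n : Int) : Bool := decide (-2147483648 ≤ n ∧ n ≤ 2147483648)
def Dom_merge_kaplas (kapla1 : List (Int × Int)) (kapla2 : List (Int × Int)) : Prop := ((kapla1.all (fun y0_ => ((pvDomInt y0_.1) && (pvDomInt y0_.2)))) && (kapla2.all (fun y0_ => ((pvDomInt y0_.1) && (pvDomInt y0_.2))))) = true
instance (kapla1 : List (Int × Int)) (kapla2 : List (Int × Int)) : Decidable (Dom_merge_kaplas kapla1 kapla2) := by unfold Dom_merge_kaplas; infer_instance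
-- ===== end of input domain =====

-- B replaces A's single scan tracking four running extrema by sorting each coordinate
-- list once and reading the bounds off as first/last elements (alternative decomposition).

-- ===== PORT A =====
def merge_kaplas (kapla1 : List (Int × Int)) (kapla2 : List (Int × Int)) : List (Int × Int) :=
  match kapla1 with
  | [] => []  -- kapla1[0] raises IndexError in Python; excluded by Pre_
  | p :: _ =>
    let s := (kapla1 ++ kapla2).foldl
      (fun (s : Int × Int × Int × Int) (point : Int × Int) =>
        let (min_x, max_x, min_y, max_y) := s
        let max_x := if point.1 > max_x then point.1 else max_x
        let min_x := if point.1 < min_x then point.1 else min_x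
        let max_y := if point.2 > max_y then point.2 else max_y
        let min_y := if point.2 < min_y then point.2 else min_y
        (min_x, max_x, min_y, max_y))
      (p.1, p.1, p.2, p.2)
    [(s.1, s.2.2.2), (s.2.1, s.2.2.2), (s.2.1, s.2.2.1), (s.1, s.2.2.1)]

-- ===== PORT B =====
def merge_kaplas_alt (kapla1 : List (Int × Int)) (kapla2 : List (Int × Int)) : List (Int × Int) :=
  let xs := PySem.List.sorted ((kapla1 ++ kapla2).map (fun p => p.1)) (fun v => v) false
  let ys := PySem.List.sorted ((kapla1 ++ kapla2).map (fun p => p.2)) (fun v => v) false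
  match PySem.List.pyGet? xs 0, PySem.List.pyGet? xs (-1),
        PySem.List.pyGet? ys 0, PySem.List.pyGet? ys (-1) with
  | some mnx, some mxx, some mny, some mxy =>
      [(mnx, mxy), (mxx, mxy), (mxx, mny), (mnx, mny)]
  | _, _, _, _ => []  -- xs[0] raises IndexError in Python (both lists empty)

-- ===== PRECONDITION & SPEC =====
-- Pre_ excludes exactly the inputs on which A raises IndexError (empty kapla1).
def Pre_merge_kaplas (kapla1 : List (Int × Int)) (kapla2 : List (Int × Int)) : Prop := kapla1 ≠ []
instance (kapla1 : List (Int × Int)) (kapla2 : List (Int × Int)) : Decidable (Pre_merge_kaplas kapla1 kapla2) := by unfold Pre_merge_kaplas; infer_instance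
def pvWitness_merge_kaplas : (List (Int × Int)) × (List (Int × Int)) := ([(0, 1), (3, -2)], [(5, 5)])

def Spec_merge_kaplas (kapla1 : List (Int × Int)) (kapla2 : List (Int × Int)) (out : List (Int × Int)) : Prop := out = merge_kaplas_alt kapla1 kapla2
instance (kapla1 : List (Int × Int)) (kapla2 : List (Int × Int)) (out : List (Int × Int)) : Decidable (Spec_merge_kaplas kapla1 kapla2 out) := by unfold Spec_merge_kaplas; infer_instance

-- ===== CLAIM (what is proved, stated in full; the proofs are below) =====
def Claim_equal_merge_kaplas : Prop := ∀ (kapla1 : List (Int × Int)) (kapla2 : List (Int × Int)), Dom_merge_kaplas kapla1 kapla2 → Pre_merge_kaplas kapla1 kapla2 → Spec_merge_kaplas kapla1 kapla2 (merge_kaplas kapla1 kapla2)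

-- ===== LEMMAS AND PROOFS =====

-- A's four running extrema computed by one foldl over pairs equal four min/max folds over the projections.
theorem fold4_eq (l : List (Int × Int)) (a b c d : Int) :
    l.foldl
      (fun (s : Int × Int × Int × Int) (point : Int × Int) =>
        let (min_x, max_x, min_y, max_y) := s
        let max_x := if point.1 > max_x then point.1 else max_x
        let min_x := if point.1 < min_x then point.1 else min_x
        let max_y := if point.2 > max_y then point.2 else max_y
        let min_y := if point.2 < min_y then point.2 else min_y
        (min_x, max_x, min_y, max_y))
      (a, b, c, d) =
    ((l.map (fun p => p.1)).foldl min a, (l.map (fun p => p.1)).foldl max b,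
     (l.map (fun p => p.2)).foldl min c, (l.map (fun p => p.2)).foldl max d) := by
  induction l generalizing a b c d with
  | nil => rfl
  | cons x t ih =>
    simp only [List.foldl_cons, List.map_cons]
    rw [ih]
    have e1 : (if x.1 < a then x.1 else a) = min a x.1 := by rw [min_def]; split_ifs <;> omega
    have e2 : (if x.1 > b then x.1 else b) = max b x.1 := by rw [max_def]; split_ifs <;> omega
    have e3 : (if x.2 < c then x.2 else c) = min c x.2 := by rw [min_def]; split_ifs <;> omega
    have e4 : (if x.2 > d then x.2 else d) = max d x.2 := by rw [max_def]; split_ifs <;> omega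
    rw [e1, e2, e3, e4]

theorem foldl_min_le (t : List Int) (a : Int) :
    t.foldl min a ≤ a ∧ ∀ y ∈ t, t.foldl min a ≤ y := by
  induction t generalizing a with
  | nil => simp
  | cons x t ih =>
    obtain ⟨h1, h2⟩ := ih (min a x)
    refine ⟨le_trans h1 (min_le_left _ _), ?_⟩
    intro y hy
    rcases List.mem_cons.mp hy with rfl | hy
    · exact le_trans h1 (min_le_right _ _)
    · exact h2 y hy

theorem foldl_min_mem (t : List Int) (a : Int) :
    t.foldl min a = a ∨ t.foldl min a ∈ t := by
  induction t generalizing a with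
  | nil => simp
  | cons x t ih =>
    rcases ih (min a x) with h | h
    · rcases min_cases a x with ⟨he, _⟩ | ⟨he, _⟩
      · left; rw [List.foldl_cons, h, he]
      · right; rw [List.foldl_cons, h, he]; exact List.mem_cons_self
    · right; exact List.mem_cons_of_mem _ h

theorem foldl_max_mem (t : List Int) (a : Int) :
    t.foldl max a = a ∨ t.foldl max a ∈ t := by
  induction t generalizing a with
  | nil => simp
  | cons x t ih =>
    rcases ih (max a x) with h | h
    · rcases max_cases a x with ⟨he, _⟩ | ⟨he, _⟩
      · left; rw [List.foldl_cons, h, he]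
      · right; rw [List.foldl_cons, h, he]; exact List.mem_cons_self
    · right; exact List.mem_cons_of_mem _ h

-- The first/last element of the sorted coordinate list is the fold-min/fold-max that A computes.
theorem sorted_bounds (X : List Int) (a : Int) (ha : a ∈ X) :
    PySem.List.pyGet? (PySem.List.sorted X (fun v => v) false) 0 = some (X.foldl min a)
  ∧ PySem.List.pyGet? (PySem.List.sorted X (fun v => v) false) (-1) = some (X.foldl max a) := by
  have hne : X ≠ [] := List.ne_nil_of_mem ha
  have hmne : PySem.List.sorted X (fun v => v) false ≠ [] := by
    simpa [PySem.List.sorted_eq_nil_iff]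
  have hlen : (PySem.List.sorted X (fun v => v) false).length = X.length :=
    PySem.List.length_sorted X (fun v => v) false
  have hpos : 0 < (PySem.List.sorted X (fun v => v) false).length :=
    List.length_pos_of_ne_nil hmne
  -- min side
  have hminmem : X.foldl min a ∈ X := by
    rcases foldl_min_mem X a with h | h
    · rw [h]; exact ha
    · exact h
  have hminle := foldl_min_le X a
  -- max side
  have hmaxmem : X.foldl max a ∈ X := by
    rcases foldl_max_mem X a with h | h
    · rw [h]; exact ha
    · exact h
  have hmaxge := PySem.List.le_foldl_max X a
  constructor
  · -- head of sorted = fold min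
    obtain ⟨m0, t, hcons⟩ := List.exists_cons_of_ne_nil hmne
    have hhead : ∀ y ∈ X, m0 ≤ y := PySem.List.key_head_sorted_le X (fun v => v) hcons
    have hm0mem : m0 ∈ X := by
      rw [← PySem.List.mem_sorted X (fun v => v) false, hcons]; exact List.mem_cons_self
    have heq : m0 = X.foldl min a :=
      le_antisymm (hhead _ hminmem) (hminle.2 _ hm0mem)
    rw [hcons]
    simp [PySem.List.pyGet?, PySem.List.pyIdx?, heq]
  · -- last of sorted = fold max
    have hXpos : 0 < X.length := by rw [← hlen]; exact hpos
    have hX1 : 1 ≤ X.length := hXpos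
    have hget : PySem.List.pyGet? (PySem.List.sorted X (fun v => v) false) (-1) =
        some ((PySem.List.sorted X (fun v => v) false)[X.length - 1]'(by rw [hlen]; omega)) := by
      simp [PySem.List.pyGet?, PySem.List.pyIdx?, hX1]
    rw [hget]
    have hcmem : (PySem.List.sorted X (fun v => v) false)[X.length - 1]'(by rw [hlen]; omega) ∈ X := by
      rw [← PySem.List.mem_sorted X (fun v => v) false]
      exact List.getElem_mem _
    have hcge : ∀ y ∈ X, y ≤ (PySem.List.sorted X (fun v => v) false)[X.length - 1]'(by rw [hlen]; omega) := by
      intro y hy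
      rw [← PySem.List.mem_sorted X (fun v => v) false] at hy
      obtain ⟨i, hi, rfl⟩ := List.mem_iff_getElem.mp hy
      exact PySem.List.key_sorted_getElem_mono X (fun v => v) (by omega) (by rw [hlen]; omega)
    have heq : (PySem.List.sorted X (fun v => v) false)[X.length - 1]'(by rw [hlen]; omega) = X.foldl max a :=
      le_antisymm (hmaxge.2 _ hcmem) (hcge _ hmaxmem)
    rw [heq]

-- ===== VERDICT (by name: the statement is the Claim_ definition above) =====
theorem merge_kaplas_spec : Claim_equal_merge_kaplas := by
  intro kapla1 kapla2 _ hpre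
  unfold Spec_merge_kaplas
  match kapla1, hpre with
  | p :: t, _ =>
    unfold merge_kaplas merge_kaplas_alt
    have hx : p.1 ∈ ((p :: t) ++ kapla2).map (fun q => q.1) := by simp
    have hy : p.2 ∈ ((p :: t) ++ kapla2).map (fun q => q.2) := by simp
    obtain ⟨hx0, hx1⟩ := sorted_bounds _ _ hx
    obtain ⟨hy0, hy1⟩ := sorted_bounds _ _ hy
    simp only [fold4_eq, hx0, hx1, hy0, hy1]
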